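-- pv_equiv track=rewrite | github.com/ZacharyGonzalez/Python-Desktop-Recorder | Day1/main.py | stringcount
-- ===== SOURCE A (Python) =====
-- def stringcount(List:list[str]) -> dict[str:int]:
--     count:dict[str:int] = {}
--     for string in List:
--         for letter in string:
--             if letter in count:
--                 count[letter] += 1
--             else:
--                 count[letter] = 1
--     return count
-- ===== SOURCE B (Python) =====
-- def stringcount(List: list[str]) -> dict[str, int]:
--     chars = [letter for string in List for letter in string]
--     return {c: chars.count(c) for c in dict.fromkeys(chars)}
-- ===== Notes on version B (the rewrite author's own statement) =====
-- stated objective: idiomatic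
-- what changed: A keeps a running dict of counts updated character by character; B flattens the strings once and then, for each distinct character in first-occurrence order, re-scans the flattened list with list.count, maintaining no accumulator.
import Mathlib
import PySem

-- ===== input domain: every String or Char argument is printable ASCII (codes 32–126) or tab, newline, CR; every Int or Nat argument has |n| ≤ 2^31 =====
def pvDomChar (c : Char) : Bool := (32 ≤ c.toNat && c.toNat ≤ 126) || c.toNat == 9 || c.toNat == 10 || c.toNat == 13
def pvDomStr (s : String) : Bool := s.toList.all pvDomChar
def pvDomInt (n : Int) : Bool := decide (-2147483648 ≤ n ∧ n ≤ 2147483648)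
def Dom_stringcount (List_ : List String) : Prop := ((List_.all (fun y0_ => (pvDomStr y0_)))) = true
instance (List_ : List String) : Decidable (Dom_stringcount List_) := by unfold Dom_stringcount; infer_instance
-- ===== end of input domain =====

-- B replaces A's running count-dict with a single flatten followed by a count per distinct character (idiomatic dict comprehension); equivalence of the return value is proved.

-- ===== PORT A =====
-- A: running dict, updated letter by letter over each string.
def stringcount (List_ : List String) : List (String × Int) :=
  (List_.foldl
    (fun count string =>
      string.toList.foldl
        (fun count c =>
          let letter := String.mk [c]
          if count.contains letter then
            count.insert letter (count.getD letter 0 + 1)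
          else
            count.insert letter 1)
        count)
    PySem.Dict.empty).items

-- ===== PORT B =====
-- B: flatten to the list of (one-character-string) letters, then one count per distinct letter.
def stringcount_alt (List_ : List String) : List (String × Int) :=
  let chars := List_.flatMap (fun string => string.toList.map (fun c => String.mk [c]))
  (PySem.List.dedup chars).map (fun c => (c, (chars.count c : Int)))

-- ===== PRECONDITION & SPEC =====
def Spec_stringcount (List_ : List String) (out : List (String × Int)) : Prop := out = stringcount_alt List_
instance (List_ : List String) (out : List (String × Int)) : Decidable (Spec_stringcount List_ out) := by unfold Spec_stringcount; infer_instance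

-- ===== CLAIM (what is proved, stated in full; the proofs are below) =====
def Claim_equal_stringcount : Prop := ∀ (List_ : List String), Dom_stringcount List_ → Spec_stringcount List_ (stringcount List_)

-- ===== LEMMAS AND PROOFS =====

-- A's branched update is exactly the Counter update step.
theorem pv_step_eq (d : PySem.Dict String Int) (x : String) :
    (if d.contains x then d.insert x (d.getD x 0 + 1) else d.insert x 1)
      = d.insert x (d.getD x 0 + 1) := by
  by_cases h : d.contains x = true
  · simp [h]
  · simp only [Bool.not_eq_true] at h
    simp [h, PySem.Dict.getD_of_not_contains (h := h)]

-- A's nested loops are the Counter of the flattened letter list.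
theorem pv_A_eq_counter (List_ : List String) :
    (List_.foldl
      (fun count string =>
        string.toList.foldl
          (fun count c =>
            let letter := String.mk [c]
            if count.contains letter then
              count.insert letter (count.getD letter 0 + 1)
            else
              count.insert letter 1)
          count)
      PySem.Dict.empty)
      = PySem.Dict.counter (List_.flatMap (fun string => string.toList.map (fun c => String.mk [c]))) := by
  rw [← PySem.Dict.foldl_insert_getD_add_one_eq_counter]
  induction List_ using List.reverseRecOn with
  | nil => rfl
  | append_singleton l s ih =>
    simp only [List.foldl_append, List.flatMap_append, List.foldl_cons, List.foldl_nil,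
      List.flatMap_cons, List.flatMap_nil, List.append_nil, ih]
    rw [List.foldl_map]
    apply PySem.List.foldl_congr_mem
    intro acc x _
    exact pv_step_eq acc (String.mk [x])

-- ===== VERDICT (by name: the statement is the Claim_ definition above) =====
theorem stringcount_spec : Claim_equal_stringcount := by
  intro List_ _
  unfold Spec_stringcount stringcount stringcount_alt
  rw [pv_A_eq_counter, PySem.Dict.items_counter]
  simp
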